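-- pv_equiv track=rewrite | github.com/mjnkao/aicos-pub | packages/aicos-kernel/aicos_kernel/kernel.py | summarize_bullets
-- ===== SOURCE A (Python) =====
-- def summarize_bullets(section: str, limit: int = 5) -> list[str]:
--     bullets: list[str] = []
--     current: str | None = None
--     for line in section.splitlines():
--         stripped = line.strip()
--         prefix = stripped.split(" ", 1)[0]
--         if stripped.startswith("- ") or (prefix.endswith(".") and prefix[:-1].isdigit()):
--             if current is not None:
--                 bullets.append(current)
--                 if len(bullets) >= limit:
--                     break
--             current = stripped
--             continue
--         if current and stripped and not stripped.startswith("#"):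
--             current = f"{current} {stripped}"
--     if current is not None and len(bullets) < limit:
--         bullets.append(current)
--     return bullets
-- ===== SOURCE B (Python) =====
-- def summarize_bullets(section: str, limit: int = 5) -> list[str]:
--     # Two-phase: collect each bullet as a block of its lines, then join and cap.
--     blocks: list[list[str]] = []
--     for line in section.splitlines():
--         stripped = line.strip()
--         head = stripped.split(" ", 1)[0]
--         if stripped.startswith("- ") or (head.endswith(".") and head[:-1].isdigit()):
--             blocks.append([stripped])
--         elif blocks and stripped and not stripped.startswith("#"):
--             blocks[-1].append(stripped)
--     if limit <= 0:
--         return []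
--     return [" ".join(b) for b in blocks[:limit]]
-- ===== Notes on version B (the rewrite author's own statement) =====
-- stated objective: alternative
-- what changed: A's single loop that threads a growing accumulator string with break-on-cap and a post-loop flush is re-decomposed into three phases: collect each bullet as a block of its lines, apply the cap by slicing, and space-join each kept block once.
-- intended difference: For a non-positive limit on a section with at least two bullet-start lines, A's break-on-cap accidentally returns the first bullet, while B returns [], the intended meaning of a cap of zero or less. — e.g. on summarize_bullets("- a\n- b", 0): A returns ["- a"], B returns []
import Mathlib
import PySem

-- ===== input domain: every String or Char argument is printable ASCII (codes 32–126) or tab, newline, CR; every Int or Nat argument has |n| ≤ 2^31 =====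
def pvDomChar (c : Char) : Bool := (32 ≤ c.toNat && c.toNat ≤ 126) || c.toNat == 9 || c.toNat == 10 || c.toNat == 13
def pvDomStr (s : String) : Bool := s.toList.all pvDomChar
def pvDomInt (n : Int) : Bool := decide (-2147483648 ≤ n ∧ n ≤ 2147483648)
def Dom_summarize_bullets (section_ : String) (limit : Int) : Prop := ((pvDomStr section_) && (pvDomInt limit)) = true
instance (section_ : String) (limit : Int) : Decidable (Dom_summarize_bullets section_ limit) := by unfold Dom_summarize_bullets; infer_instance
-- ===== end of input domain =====

-- B re-decomposes A's single accumulating loop into three phases (collect bullet blocks, cap by slicing, space-join each kept block once); for a non-positive limit B returns [] where A's break-on-cap accidentally emits the first bullet (objective: alternative decomposition; D_ states the difference).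

-- ===== PORT A =====
-- shared by both ports: both Pythons classify a stripped line as a bullet start by the same test
def pvIsBullet (stripped : String) : Bool :=
  let pfx := ((PySem.Str.splitMax? stripped " " 1).getD []).headD ""
  PySem.Str.startswith stripped "- " ||
    (PySem.Str.endswith pfx "." && PySem.Str.strIsdigit (PySem.Str.slice pfx none (some (-1))))

-- the for-loop of A: state (bullets, current); returns the state at loop exit (normal or break)
def pvALoop (limit : Int) : List String → List String → Option String → List String × Option String
  | [], bullets, current => (bullets, current)
  | line :: rest, bullets, current =>
    let stripped := PySem.Str.strip line
    if pvIsBullet stripped then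
      match current with
      | some c =>
        if limit ≤ ((bullets ++ [c]).length : Int) then (bullets ++ [c], some c)  -- break
        else pvALoop limit rest (bullets ++ [c]) (some stripped)
      | none => pvALoop limit rest bullets (some stripped)
    else
      match current with
      | some c =>
        if c != "" && stripped != "" && !PySem.Str.startswith stripped "#" then
          pvALoop limit rest bullets (some (c ++ " " ++ stripped))
        else pvALoop limit rest bullets (some c)
      | none => pvALoop limit rest bullets none

-- the code after A's loop
def pvAFinal (limit : Int) (r : List String × Option String) : List String :=
  match r.2 with
  | some c => if (r.1.length : Int) < limit then r.1 ++ [c] else r.1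
  | none => r.1

def summarize_bullets (section_ : String) (limit : Int) : List String :=
  pvAFinal limit (pvALoop limit (PySem.Str.splitlines section_) [] none)

-- ===== PORT B =====
-- blocks[-1].append(s)
def pvAppendLast : List (List String) → String → List (List String)
  | [], _ => []
  | [b], s => [b ++ [s]]
  | b :: b' :: rest, s => b :: pvAppendLast (b' :: rest) s

-- one iteration of B's block-collecting loop
def pvBStep (blocks : List (List String)) (line : String) : List (List String) :=
  if pvIsBullet (PySem.Str.strip line) then blocks ++ [[PySem.Str.strip line]]
  else if !blocks.isEmpty && PySem.Str.strip line != "" &&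
      !PySem.Str.startswith (PySem.Str.strip line) "#" then
    pvAppendLast blocks (PySem.Str.strip line)
  else blocks

def summarize_bullets_alt (section_ : String) (limit : Int) : List String :=
  let blocks := (PySem.Str.splitlines section_).foldl pvBStep []
  if limit ≤ 0 then []
  else (PySem.List.slice blocks none (some limit)).map (fun b => PySem.Str.join " " b)

-- ===== PRECONDITION & SPEC =====
-- For a non-positive limit on a section with at least two bullet-start lines, A's break-on-cap
-- accidentally returns the first bullet, while B returns [], the intended meaning of a cap ≤ 0.
def pvDBullet (line : String) : Bool :=
  let cs := PySem.Chars.strip line.toList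
  let tok := cs.takeWhile (fun c => c != ' ')
  PySem.Chars.startswith cs ['-', ' '] ||
    (PySem.Chars.endswith tok ['.'] && PySem.Chars.strIsdigit tok.dropLast)

def D_summarize_bullets (section_ : String) (limit : Int) : Prop :=
  limit ≤ 0 ∧ 2 ≤ (PySem.Str.splitlines section_).countP pvDBullet
instance (section_ : String) (limit : Int) : Decidable (D_summarize_bullets section_ limit) := by
  unfold D_summarize_bullets; infer_instance

def Spec_summarize_bullets (section_ : String) (limit : Int) (out : List String) : Prop :=
  ¬ D_summarize_bullets section_ limit → out = summarize_bullets_alt section_ limit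
instance (section_ : String) (limit : Int) (out : List String) : Decidable (Spec_summarize_bullets section_ limit out) := by unfold Spec_summarize_bullets; infer_instance

def pvDiffWitness_summarize_bullets : String × Int := ("- a\n- b", 0)
def pvDiffWitnessOut_summarize_bullets : (List String) × (List String) := (["- a"], [])

-- ===== CLAIM (what is proved, stated in full; the proofs are below) =====
def Claim_unchanged_summarize_bullets : Prop := ∀ (section_ : String) (limit : Int), Dom_summarize_bullets section_ limit → Spec_summarize_bullets section_ limit (summarize_bullets section_ limit)
def Claim_changed_summarize_bullets : Prop := Dom_summarize_bullets (pvDiffWitness_summarize_bullets.1) (pvDiffWitness_summarize_bullets.2) ∧ D_summarize_bullets (pvDiffWitness_summarize_bullets.1) (pvDiffWitness_summarize_bullets.2) ∧ summarize_bullets (pvDiffWitness_summarize_bullets.1) (pvDiffWitness_summarize_bullets.2) = pvDiffWitnessOut_summarize_bullets.1 ∧ summarize_bullets_alt (pvDiffWitness_summarize_bullets.1) (pvDiffWitness_summarize_bullets.2) = pvDiffWitnessOut_summarize_bullets.2 ∧ pvDiffWitnessOut_summarize_bullets.1 ≠ pvDiffWitnessOut_summarize_bullets.2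
def Claim_exact_summarize_bullets : Prop := ∀ (section_ : String) (limit : Int), Dom_summarize_bullets section_ limit → D_summarize_bullets section_ limit → summarize_bullets section_ limit ≠ summarize_bullets_alt section_ limit

-- ===== LEMMAS AND PROOFS =====

-- proof-side helper: A's result expressed over B's block state (join each block, then A's cap rule)
def pvCap (limit : Int) (blocks : List (List String)) : List String :=
  let joined := blocks.map (fun b => PySem.Str.join " " b)
  if 1 ≤ limit then PySem.List.slice joined none (some limit)
  else if 2 ≤ (blocks.length : Int) then PySem.List.slice joined none (some 1)
  else []

-- a bullet-start line is a nonempty string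
lemma pvIsBullet_ne_empty {s : String} (h : pvIsBullet s = true) : s ≠ "" := by
  intro he; subst he; exact absurd h (by decide)

-- " ".join(lb + [s]) = " ".join(lb) + " " + s for nonempty lb
lemma pvJoin_append_singleton (lb : List String) (hlb : lb ≠ []) (s : String) :
    PySem.Str.join " " (lb ++ [s]) = PySem.Str.join " " lb ++ " " ++ s := by
  apply String.toList_inj.mp
  simp only [PySem.Str.toList_join, String.toList_append, List.map_append, List.map_cons,
    List.map_nil]
  induction lb with
  | nil => exact absurd rfl hlb
  | cons a t ih =>
    cases t with
    | nil => simp [PySem.Chars.join_cons_cons, PySem.Chars.join_singleton]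
    | cons b t' =>
      simp only [List.map_cons, List.cons_append, PySem.Chars.join_cons_cons]
      simp only [List.map_cons] at ih
      rw [List.append_assoc, List.append_assoc, ← List.cons_append, ih (by simp)]
      simp

lemma pvJoin_singleton (s : String) : PySem.Str.join " " [s] = s := by
  apply String.toList_inj.mp
  simp [PySem.Str.toList_join, PySem.Chars.join_singleton]

-- appending the continuation of a nonempty string is nonempty
lemma pvAppendStr_ne_empty (c s : String) : c ++ " " ++ s ≠ "" := by
  intro h
  have := congrArg String.toList h
  simp [String.toList_append] at this

-- pvAppendLast distributes over a nonempty suffix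
lemma pvAppendLast_append (blocks l : List (List String)) (hl : l ≠ []) (s : String) :
    pvAppendLast (blocks ++ l) s = blocks ++ pvAppendLast l s := by
  induction blocks with
  | nil => simp
  | cons b bs ih =>
    cases hbs : bs ++ l with
    | nil => rcases l with _ | _ <;> simp_all
    | cons x xs =>
      simp only [List.cons_append, hbs, pvAppendLast]
      rw [← hbs, ih]

lemma pvBStep_ne_nil {blocks : List (List String)} (h : blocks ≠ []) (line : String) :
    pvBStep blocks line ≠ [] := by
  unfold pvBStep
  split
  · exact List.append_ne_nil_of_right_ne_nil _ (by simp)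
  · split
    · rcases blocks with _ | ⟨b, bs⟩
      · exact absurd rfl h
      · rcases bs with _ | ⟨b', bs'⟩ <;> simp [pvAppendLast]
    · exact h

lemma pvBStep_append (blocks l : List (List String)) (hl : l ≠ []) (line : String) :
    pvBStep (blocks ++ l) line = blocks ++ pvBStep l line := by
  unfold pvBStep
  split
  · simp
  · have hne : (blocks ++ l).isEmpty = false := by
      simp [List.isEmpty_eq_false_iff, hl]
    have hne' : l.isEmpty = false := by simp [List.isEmpty_eq_false_iff, hl]
    rw [hne, hne']
    split
    · exact pvAppendLast_append blocks l hl _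
    · rfl

lemma pvBFold_append (lines : List String) (blocks l : List (List String)) (hl : l ≠ []) :
    lines.foldl pvBStep (blocks ++ l) = blocks ++ lines.foldl pvBStep l := by
  induction lines generalizing l with
  | nil => rfl
  | cons line rest ih =>
    simp only [List.foldl_cons]
    rw [pvBStep_append blocks l hl line, ih _ (pvBStep_ne_nil hl line)]

lemma pvBFold_ne_nil (lines : List String) {l : List (List String)} (hl : l ≠ []) :
    lines.foldl pvBStep l ≠ [] := by
  induction lines generalizing l with
  | nil => exact hl
  | cons line rest ih => exact ih (pvBStep_ne_nil hl line)

-- main invariant: A's loop state (bs.map join, some (join lb)) matches B's block state bs ++ [lb]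
lemma pvPhase1 (limit : Int) (lines : List String) :
    ∀ (bs : List (List String)) (lb : List String), lb ≠ [] →
    PySem.Str.join " " lb ≠ "" →
    ((bs.length : Int) < limit ∨ bs = []) →
    pvAFinal limit (pvALoop limit lines (bs.map (fun b => PySem.Str.join " " b)) (some (PySem.Str.join " " lb)))
      = pvCap limit (lines.foldl pvBStep (bs ++ [lb])) := by
  induction lines with
  | nil =>
    intro bs lb hlb hc hlen
    simp only [pvALoop, List.foldl_nil, pvAFinal, pvCap, List.map_append, List.map_cons,
      List.map_nil, List.length_append, List.length_map, List.length_cons, List.length_nil]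
    by_cases h1 : (1:Int) ≤ limit
    · have hlt : ((bs.length : Int)) < limit := by
        rcases hlen with h | h
        · exact h
        · subst h; simpa using h1
      rw [if_pos (by simpa using hlt), if_pos h1, PySem.List.slice_to _ (by omega)]
      rw [List.take_of_length_le (by simp; omega)]
    · have hbs : bs = [] := by
        rcases hlen with h | h
        · exfalso; omega
        · exact h
      subst hbs
      simp only [List.length_nil, List.map_nil, List.nil_append, Nat.cast_zero]
      rw [if_neg (by omega), if_neg h1, if_neg (by simp)]
  | cons line rest ih =>
    intro bs lb hlb hc hlen
    simp only [pvALoop, List.foldl_cons]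
    by_cases hb : pvIsBullet (PySem.Str.strip line) = true
    · rw [if_pos hb]
      simp only [pvBStep, if_pos hb]
      by_cases hbr : limit ≤ (((bs.map (fun b => PySem.Str.join " " b) ++ [PySem.Str.join " " lb]).length : Int))
      · rw [if_pos hbr]
        rw [pvBFold_append rest (bs ++ [lb]) [[PySem.Str.strip line]] (by simp)]
        set T := rest.foldl pvBStep [[PySem.Str.strip line]] with hT
        have hTne : T ≠ [] := pvBFold_ne_nil rest (by simp)
        simp only [List.length_append, List.length_map, List.length_cons, List.length_nil] at hbr
        simp only [pvAFinal, pvCap, List.map_append, List.map_cons, List.map_nil,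
          List.length_append, List.length_map, List.length_cons, List.length_nil]
        rw [if_neg (by simp; omega)]
        by_cases h1 : (1:Int) ≤ limit
        · have hlim : limit = (bs.length : Int) + 1 := by
            rcases hlen with h | h
            · omega
            · subst h; simp at hbr ⊢; omega
          rw [if_pos h1, PySem.List.slice_to _ (by omega)]
          rw [List.take_left' (by simp; omega)]
        · have hbs : bs = [] := by
            rcases hlen with h | h
            · exfalso; omega
            · exact h
          subst hbs
          have hTpos := List.length_pos_of_ne_nil hTne
          rw [if_neg h1, if_pos (by simp; omega)]
          rw [PySem.List.slice_to _ (by omega)]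
          simp
      · rw [if_neg hbr]
        have h1 : PySem.Str.join " " [PySem.Str.strip line] = PySem.Str.strip line := pvJoin_singleton _
        have h2 : bs.map (fun b => PySem.Str.join " " b) ++ [PySem.Str.join " " lb]
            = (bs ++ [lb]).map (fun b => PySem.Str.join " " b) := by simp
        rw [h2]
        have hlen' : ((bs ++ [lb]).length : Int) < limit := by
          simp only [List.length_append, List.length_map, List.length_cons,
            List.length_nil] at hbr ⊢
          push_cast at hbr ⊢
          omega
        have H := ih (bs ++ [lb]) [PySem.Str.strip line] (by simp)
          (by rw [h1]; exact pvIsBullet_ne_empty hb) (Or.inl hlen')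
        rw [h1] at H
        exact H
    · rw [if_neg hb]
      simp only [pvBStep, if_neg hb]
      have hjoin : (PySem.Str.join " " lb != "") = true := bne_iff_ne.mpr hc
      have hne : (!(bs ++ [lb]).isEmpty) = true := by simp
      rw [hne]
      by_cases hcond : (PySem.Str.strip line != "" && !PySem.Str.startswith (PySem.Str.strip line) "#") = true
      · have hA : (PySem.Str.join " " lb != "" && PySem.Str.strip line != ""
            && !PySem.Str.startswith (PySem.Str.strip line) "#") = true := by
          simp only [Bool.and_eq_true] at hcond ⊢
          exact ⟨⟨hjoin, hcond.1⟩, hcond.2⟩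
        rw [if_pos hA, Bool.true_and, if_pos hcond]
        rw [pvAppendLast_append bs [lb] (by simp) _]
        have hAL : pvAppendLast [lb] (PySem.Str.strip line) = [lb ++ [PySem.Str.strip line]] := rfl
        rw [hAL, ← pvJoin_append_singleton lb hlb]
        exact ih bs (lb ++ [PySem.Str.strip line]) (by simp)
          (by rw [pvJoin_append_singleton lb hlb]; exact pvAppendStr_ne_empty _ _) hlen
      · have hA : (PySem.Str.join " " lb != "" && PySem.Str.strip line != ""
            && !PySem.Str.startswith (PySem.Str.strip line) "#") = false := by
          rw [Bool.and_assoc, show (PySem.Str.strip line != "" && !PySem.Str.startswith (PySem.Str.strip line) "#")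
              = false from eq_false_of_ne_true hcond, Bool.and_false]
        rw [if_neg (ne_true_of_eq_false hA), Bool.true_and,
          if_neg (by simpa using hcond)]
        exact ih bs lb hlb hc hlen

lemma pvPhase0 (limit : Int) (lines : List String) :
    pvAFinal limit (pvALoop limit lines [] none) = pvCap limit (lines.foldl pvBStep []) := by
  induction lines with
  | nil =>
    simp only [pvALoop, pvAFinal, pvCap, List.map_nil, List.foldl_nil, List.length_nil]
    split
    · rw [PySem.List.slice_to _ (by omega)]; simp
    · rw [if_neg (by simp)]
  | cons line rest ih =>
    simp only [pvALoop, List.foldl_cons]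
    by_cases hb : pvIsBullet (PySem.Str.strip line) = true
    · rw [if_pos hb]
      have H := pvPhase1 limit rest [] [PySem.Str.strip line] (by simp)
        (by rw [pvJoin_singleton]; exact pvIsBullet_ne_empty hb) (Or.inr rfl)
      rw [pvJoin_singleton] at H
      simpa [pvBStep, hb] using H
    · rw [if_neg hb]
      have hB : pvBStep [] line = [] := by simp [pvBStep, hb]
      rw [hB]
      exact ih

-- D_'s bullet test coincides with the ports' test: first, the head of s.split(" ", 1)
-- is the maximal space-free prefix
lemma pvGoAcc (fuel m : Nat) (l cur : List Char) (acc : List (List Char)) :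
    ∃ tl, tl ≠ [] ∧ PySem.Chars.splitOnMax.go [' '] fuel m l cur acc = acc.reverse ++ tl := by
  induction fuel generalizing m l cur acc with
  | zero => exact ⟨[cur.reverse ++ l], by simp, by simp [PySem.Chars.splitOnMax.go]⟩
  | succ fuel ih =>
    cases l with
    | nil => exact ⟨[cur.reverse], by simp, by simp [PySem.Chars.splitOnMax.go]⟩
    | cons c rest =>
      rw [PySem.Chars.splitOnMax.go]
      by_cases hm : m = 0
      · exact ⟨[cur.reverse ++ (c :: rest)], by simp, by simp [hm]⟩
      · rw [if_neg hm]
        split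
        · obtain ⟨tl, htl, he⟩ := ih (m-1) (List.drop [' '].length (c :: rest)) [] (cur.reverse :: acc)
          exact ⟨cur.reverse :: tl, by simp, by rw [he]; simp⟩
        · obtain ⟨tl, htl, he⟩ := ih m rest (c :: cur) acc
          exact ⟨tl, htl, he⟩

lemma pvGoHead (fuel : Nat) (l cur : List Char) (h : l.length < fuel) :
    ∃ tl, PySem.Chars.splitOnMax.go [' '] fuel 1 l cur [] =
      (cur.reverse ++ l.takeWhile (fun c => c != ' ')) :: tl := by
  induction fuel generalizing l cur with
  | zero => omega
  | succ fuel ih =>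
    cases l with
    | nil => exact ⟨[], by simp [PySem.Chars.splitOnMax.go]⟩
    | cons c rest =>
      rw [PySem.Chars.splitOnMax.go, if_neg (by omega)]
      by_cases hc : c = ' '
      · subst hc
        rw [if_pos (by simp [List.isPrefixOf])]
        obtain ⟨tl, htl, he⟩ := pvGoAcc fuel 0 (List.drop [' '].length (' ' :: rest)) [] [cur.reverse]
        exact ⟨tl, by rw [he]; simp [List.takeWhile]⟩
      · rw [if_neg (by simp [List.isPrefixOf]; exact fun h' => hc h'.symm)]
        obtain ⟨tl, he⟩ := ih rest (c :: cur) (by simp at h ⊢; omega)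
        exact ⟨tl, by rw [he]; simp [hc]⟩

lemma pvSplitHead (t : String) :
    ((PySem.Str.splitMax? t " " 1).getD []).headD "" =
      String.ofList (t.toList.takeWhile (fun c => c != ' ')) := by
  obtain ⟨tl, he⟩ := pvGoHead (t.length + 1) t.toList [] (by rw [String.length_toList]; omega)
  simp only [PySem.Str.splitMax?, PySem.Chars.splitMax?]
  rw [if_neg (by decide)]
  simp [PySem.Chars.splitOnMax, he]

lemma pvCharsSliceNegOne (cs : List Char) :
    PySem.Chars.slice cs none (some (-1)) = cs.dropLast := PySem.List.slice_to_neg_one cs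

-- the two bullet tests coincide
lemma pvDBullet_eq (line : String) :
    pvDBullet line = pvIsBullet (PySem.Str.strip line) := by
  unfold pvDBullet pvIsBullet
  rw [pvSplitHead]
  simp only [PySem.Str.startswith, PySem.Str.endswith, PySem.Str.strIsdigit,
    PySem.Str.toList_slice, String.toList_ofList, pvCharsSliceNegOne,
    PySem.Str.toList_strip]
  rw [show ("- " : String).toList = ['-', ' '] from by decide,
    show ("." : String).toList = ['.'] from by decide]

lemma pvCountD_eq (lines : List String) :
    lines.countP pvDBullet = lines.countP (fun l => pvIsBullet (PySem.Str.strip l)) :=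
  List.countP_congr (fun x _ => by rw [pvDBullet_eq])

-- pvAppendLast preserves the number of blocks
lemma pvAppendLast_length (l : List (List String)) (s : String) :
    (pvAppendLast l s).length = l.length := by
  induction l with
  | nil => rfl
  | cons b bs ih =>
    cases bs with
    | nil => rfl
    | cons b' bs' => simpa [pvAppendLast] using ih

-- the number of blocks = number of bullet-start lines
lemma pvBStep_length (l : List (List String)) (line : String) :
    (pvBStep l line).length =
      l.length + (if pvIsBullet (PySem.Str.strip line) then 1 else 0) := by
  unfold pvBStep
  split
  · next h => simp [h]
  · next h =>
    simp only [h, if_false, Nat.add_zero]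
    split
    · rw [pvAppendLast_length]
    · rfl

lemma pvBFold_length (lines : List String) (l : List (List String)) :
    (lines.foldl pvBStep l).length =
      l.length + lines.countP (fun ln => pvIsBullet (PySem.Str.strip ln)) := by
  induction lines generalizing l with
  | nil => simp
  | cons line rest ih =>
    simp only [List.foldl_cons, List.countP_cons]
    rw [ih, pvBStep_length]
    by_cases hb : pvIsBullet (PySem.Str.strip line) = true <;> simp [hb] <;> omega

-- pvCap agrees with B's final phase outside D_
lemma pvCap_eq_alt (section_ : String) (limit : Int)
    (h : ¬ D_summarize_bullets section_ limit) :
    pvCap limit ((PySem.Str.splitlines section_).foldl pvBStep []) =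
      summarize_bullets_alt section_ limit := by
  unfold summarize_bullets_alt pvCap
  set blocks := (PySem.Str.splitlines section_).foldl pvBStep [] with hB
  by_cases h0 : limit ≤ 0
  · rw [if_pos h0, if_neg (by omega)]
    have hcnt : ¬ 2 ≤ (PySem.Str.splitlines section_).countP pvDBullet := by
      intro hc; exact h ⟨h0, hc⟩
    rw [pvCountD_eq] at hcnt
    have hlen : blocks.length < 2 := by
      rw [hB, pvBFold_length]; simpa using hcnt
    rw [if_neg (by push_cast; omega)]
  · rw [if_neg h0, if_pos (by omega)]
    rw [PySem.List.slice_to _ (by omega), PySem.List.slice_to _ (by omega), List.map_take]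

-- ===== VERDICT (by name: the statement is the Claim_ definition above) =====
theorem summarize_bullets_spec : Claim_unchanged_summarize_bullets := by
  intro section_ limit _ hnD
  rw [show summarize_bullets section_ limit
      = pvCap limit ((PySem.Str.splitlines section_).foldl pvBStep []) from
    pvPhase0 limit (PySem.Str.splitlines section_)]
  exact pvCap_eq_alt section_ limit hnD

theorem summarize_bullets_changed : Claim_changed_summarize_bullets := by
  unfold Claim_changed_summarize_bullets; decide

theorem summarize_bullets_tight : Claim_exact_summarize_bullets := by
  intro section_ limit _ hD
  rcases hD with ⟨h0, hc⟩
  rw [show summarize_bullets section_ limit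
      = pvCap limit ((PySem.Str.splitlines section_).foldl pvBStep []) from
    pvPhase0 limit (PySem.Str.splitlines section_)]
  rw [pvCountD_eq] at hc
  have hlen : 2 ≤ ((PySem.Str.splitlines section_).foldl pvBStep []).length := by
    rw [pvBFold_length]; simpa using hc
  unfold pvCap summarize_bullets_alt
  rw [if_neg (by omega), if_pos (by push_cast; omega), if_pos h0]
  rw [PySem.List.slice_to _ (by omega)]
  intro hcontra
  have h2 := congrArg List.length hcontra
  rw [List.length_take, List.length_map] at h2
  simp only [List.length_nil] at h2
  omega
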